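-- pv_equiv track=rewrite | github.com/Rthe3rd/data_structures_and_algos | heaps/heaps.py | stream_max
-- ===== SOURCE A (Python) =====
-- class MaxHeap:
--     def __init__(self):
--         self.heap = []
--
--     def _left_child(self, index):
--         return 2 * index + 1
--
--     def _right_child(self, index):
--         return 2 * index + 2
--
--     def _parent(self, index):
--         return (index - 1) // 2
--
--     def _swap(self, index1, index2):
--         self.heap[index1], self.heap[index2] = self.heap[index2], self.heap[index1]
--
--     # INSERT FOR MAX HEAP
--     def insert(self, value):
--         # Insert the new value at the end of the list i.e. the very end of the heap
--         self.heap.append(value)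
--         # Get the index of the last value
--         current = len(self.heap) - 1
--         # current > 0: If the current index was <= 0, that would mean subsequent swaps would result in out of bounds swaps
--         # self.heap[current] > self.heap[self._parent(current)]:
--             # One of the few tenants of heaps, all children vertices are less than in value to their parent vertex
--         while current > 0 and self.heap[current] > self.heap[self._parent(current)]:
--             # Given two indices, one for current and one for parent, swap their positions in the tree
--             self._swap(current, self._parent(current))
--             # Adjust the current variable such that it points to the proper node, i.e. the parents index
--             current = self._parent(current)
--
--     # INSERT FOR MINHEAP
--     # def insert(self, value):
--     #     self.heap.append(value)
--     #     current_index = len(self.heap) - 1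
--     #     while True:
--     #         if current_index > 0 and self.heap[current_index] < self.heap[self._parent(current_index)]:
--     #             self._swap(current_index, self._parent(current_index))
--     #             current_index = self._parent(current_index)
--     #         else:
--     #             return
--
--     # REMOVE NDOE AT GIVEN INDEX
--     # First step is to make the heap complete
--         # Take the bottom, right most vertex to the top node
--     # From there, you need to "sink down" this top node to it's proper place
--     # Cases: Empty heap, 1 item in the heap, 2 or more items in the heap
--     def remove(self, index):
--         if len(self.heap) == 0:
--             return None
--         if len(self.heap) == 1:
--             return self.heap.pop()
--         # Assign the variable max_value to the top most node (of the sub-heap given the index), which will be removed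
--         max_value = self.heap[index]
--         # Assign the first value (top most position in the heap) to the bottom, right most vertex, returned by self.head.pop()
--         self.heap[index] = self.heap.pop()
--         # Class method to adjust the values in the heap such that it follows the rules of a heap (all children vertices are less than in value to their parent vertex)
--         self._sink_down(index)
--         return max_value
--
--     # SINK DOWN NODE/RAISE NEW TOP NODE
--     def _sink_down(self, index):
--         # Max index is the top-most index that needs be "sunk down"
--         max_index = index
--         while True:
--             left_index = self._left_child(index)
--             right_index = self._right_child(index)
--             # left_index < len(self.heap): if the left index is a valid array index
--             # self.heap[left_index] > self.heap[max_index]: if the value below (on the left) is greater than the parents, change the max index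
--             if left_index < len(self.heap) and self.heap[left_index] > self.heap[max_index]:
--                 max_index = left_index
--             # right_index < len(self.heap): if the right index is a valid array index
--             # self.heap[right_index] > self.heap[max_index]: if the value below (on the right) is greater than the parents, change the max index
--             if right_index < len(self.heap) and self.heap[right_index] > self.heap[max_index]:
--                 max_index = right_index
--             # max_index != index: Was the max_index adjusted; i.e. was the *value* of the node at the max_index there less than either of the values below it?
--                 # if so, swap the values and rename assign the index to the current max_index
--             if max_index != index:
--                 self._swap(index, max_index)
--                 index = max_index
--             # If the max_index didn't change, i.e. the value at the max_index is greater than the left and right children,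
--                 # no more sinking down is needed and exit the loop
--             # Note that you only perform node swapping at the end IF the index max_index was changed.
--             # Node swapping is then done by calling the ._swap() helper method
--             else:
--                 return
--
-- def stream_max(input_array):
--     max_value_holder = []
--     for number in input_array:
--         if not max_value_holder:
--             max_value_holder.append(number)
--             max_heap = MaxHeap()
--             max_heap.insert(number)
--         else:
--             max_heap.insert(number)
--             max_value_holder.append(max_heap.heap[0])
--     return max_value_holder
-- ===== SOURCE B (Python) =====
-- def stream_max(input_array):
--     result = []
--     current = None
--     for x in input_array:
--         current = x if current is None or x > current else current
--         result.append(current)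
--     return result
-- ===== Notes on version B (the rewrite author's own statement) =====
-- stated objective: faster
-- what changed: Replaces the MaxHeap (append + sift-up per element, reading heap[0]) with a single pass that keeps only the running maximum in one variable.
import Mathlib
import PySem

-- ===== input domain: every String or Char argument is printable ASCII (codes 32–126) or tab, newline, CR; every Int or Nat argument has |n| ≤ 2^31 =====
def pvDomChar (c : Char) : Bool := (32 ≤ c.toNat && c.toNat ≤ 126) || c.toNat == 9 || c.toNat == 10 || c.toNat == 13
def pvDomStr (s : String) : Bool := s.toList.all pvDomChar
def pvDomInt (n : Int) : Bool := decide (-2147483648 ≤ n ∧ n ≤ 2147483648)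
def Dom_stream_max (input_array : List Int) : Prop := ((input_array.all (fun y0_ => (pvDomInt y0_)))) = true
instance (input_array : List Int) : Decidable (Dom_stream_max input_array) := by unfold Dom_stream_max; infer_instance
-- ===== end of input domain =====

-- B replaces A's MaxHeap (append + sift-up per element, then read heap[0]) with a single
-- pass keeping only the running maximum in one variable; return values are proved equal.

-- ===== PORT A =====
-- Python `self.heap[i], self.heap[j] = self.heap[j], self.heap[i]` (both reads happen
-- before the writes).  All indices A uses are in range, so the getD default is never read.
def pySwap (heap : List Int) (i j : Nat) : List Int :=
  (heap.set i (heap.getD j 0)).set j (heap.getD i 0)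

-- the `while current > 0 and heap[current] > heap[parent]` loop of MaxHeap.insert;
-- `current` is a nonnegative Python int, so Nat with Nat division matches `(current-1)//2`.
def siftUp (heap : List Int) (current : Nat) : List Int :=
  if _ : 0 < current then
    if heap.getD current 0 > heap.getD ((current - 1) / 2) 0 then
      siftUp (pySwap heap current ((current - 1) / 2)) ((current - 1) / 2)
    else heap
  else heap
termination_by current
decreasing_by
  have := Nat.div_le_self (current - 1) 2; omega

-- MaxHeap.insert: append at the end, then sift up from the last index.
def heapInsert (heap : List Int) (v : Int) : List Int :=
  siftUp (heap ++ [v]) ((heap ++ [v]).length - 1)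

-- the body of A's `for number in input_array` loop, state = (max_value_holder, heap)
def streamStep (st : List Int × List Int) (number : Int) : List Int × List Int :=
  if st.1.isEmpty then
    (st.1 ++ [number], heapInsert [] number)
  else
    let heap' := heapInsert st.2 number
    (st.1 ++ [heap'.getD 0 0], heap')

def stream_max (input_array : List Int) : List Int :=
  (input_array.foldl streamStep ([], [])).1

-- ===== PORT B =====
-- the body of B's loop, state = (result, current)
def altStep (st : List Int × Option Int) (x : Int) : List Int × Option Int :=
  let c : Int := match st.2 with
    | none => x
    | some c => if x > c then x else c
  (st.1 ++ [c], some c)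

def stream_max_alt (input_array : List Int) : List Int :=
  (input_array.foldl altStep ([], none)).1

-- ===== PRECONDITION & SPEC =====
def Spec_stream_max (input_array : List Int) (out : List Int) : Prop := out = stream_max_alt input_array
instance (input_array : List Int) (out : List Int) : Decidable (Spec_stream_max input_array out) := by unfold Spec_stream_max; infer_instance

-- ===== CLAIM (what is proved, stated in full; the proofs are below) =====
def Claim_equal_stream_max : Prop := ∀ (input_array : List Int), Dom_stream_max input_array → Spec_stream_max input_array (stream_max input_array)

-- ===== LEMMAS AND PROOFS =====

theorem pySwap_length (heap : List Int) (i j : Nat) :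
    (pySwap heap i j).length = heap.length := by
  simp [pySwap]

theorem getD_set_eq (l : List Int) (i : Nat) (a : Int) (h : i < l.length) :
    (l.set i a).getD i 0 = a := by
  simp [List.getD, h]

theorem getD_set_ne (l : List Int) (i j : Nat) (a : Int) (h : i ≠ j) :
    (l.set i a).getD j 0 = l.getD j 0 := by
  simp [List.getD, List.getElem?_set_ne h]

theorem pySwap_getD_fst (heap : List Int) (i j : Nat) (hi : i < heap.length) (hij : i ≠ j) :
    (pySwap heap i j).getD i 0 = heap.getD j 0 := by
  unfold pySwap
  rw [getD_set_ne _ _ _ _ (Ne.symm hij), getD_set_eq _ _ _ hi]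

theorem pySwap_getD_snd (heap : List Int) (i j : Nat) (hj : j < heap.length) :
    (pySwap heap i j).getD j 0 = heap.getD i 0 := by
  unfold pySwap
  rw [getD_set_eq]
  simpa using hj

theorem pySwap_getD_other (heap : List Int) (i j k : Nat) (hki : k ≠ i) (hkj : k ≠ j) :
    (pySwap heap i j).getD k 0 = heap.getD k 0 := by
  unfold pySwap
  rw [getD_set_ne _ _ _ _ (Ne.symm hkj), getD_set_ne _ _ _ _ (Ne.symm hki)]

theorem siftUp_spec (current : Nat) : ∀ (heap : List Int) (m v : Int),
    0 < current → current < heap.length →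
    heap.getD current 0 = v → heap.getD 0 0 = m →
    (∀ i, i < heap.length → i ≠ current → heap.getD i 0 ≤ m) →
    (siftUp heap current).length = heap.length ∧
    (siftUp heap current).getD 0 0 = max m v ∧
    (∀ i, i < heap.length → (siftUp heap current).getD i 0 ≤ max m v) := by
  induction current using Nat.strong_induction_on with
  | _ current ih =>
    intro heap m v hpos hlt hcv h0 hb
    rw [siftUp, dif_pos hpos]
    obtain ⟨p, hp⟩ : ∃ p, (current - 1) / 2 = p := ⟨_, rfl⟩
    rw [hp]
    have hplt : p < current := by omega
    have hpne : p ≠ current := Nat.ne_of_lt hplt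
    by_cases hgt : heap.getD current 0 > heap.getD p 0
    · rw [if_pos hgt]
      have hplen : p < heap.length := lt_trans hplt hlt
      have hswlen : (pySwap heap current p).length = heap.length := pySwap_length _ _ _
      have hswp : (pySwap heap current p).getD p 0 = v := by
        rw [pySwap_getD_snd _ _ _ hplen, hcv]
      have hswc : (pySwap heap current p).getD current 0 = heap.getD p 0 :=
        pySwap_getD_fst _ _ _ hlt (Ne.symm hpne)
      have hswo : ∀ k, k ≠ current → k ≠ p →
          (pySwap heap current p).getD k 0 = heap.getD k 0 := by
        intro k h1 h2; exact pySwap_getD_other _ _ _ _ h1 h2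
      have hvp : heap.getD p 0 ≤ m := hb p hplen hpne
      by_cases hp0 : p = 0
      · -- swapped into the root: the loop then stops (next call has current = 0)
        subst hp0
        rw [hcv, h0] at hgt
        have hmax : max m v = v := max_eq_right (le_of_lt hgt)
        rw [siftUp, dif_neg (lt_irrefl 0)]
        refine ⟨hswlen, by rw [hswp, hmax], ?_⟩
        intro i hilen
        by_cases hic : i = current
        · subst hic; rw [hswc, hmax]; rw [h0] at hvp; omega
        · by_cases hi0 : i = 0
          · subst hi0; rw [hswp]; omega
          · rw [hswo i hic hi0, hmax]
            have := hb i hilen hic; omega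
      · have hppos : 0 < p := Nat.pos_of_ne_zero hp0
        have h0sw : (pySwap heap current p).getD 0 0 = m := by
          rw [hswo 0 (by omega) (by omega), h0]
        have hbsw : ∀ i, i < (pySwap heap current p).length → i ≠ p →
            (pySwap heap current p).getD i 0 ≤ m := by
          intro i hilen hip
          rw [hswlen] at hilen
          by_cases hic : i = current
          · subst hic; rw [hswc]; exact hvp
          · rw [hswo i hic hip]; exact hb i hilen hic
        obtain ⟨l1, l2, l3⟩ := ih p hplt (pySwap heap current p) m v hppos
          (by rw [hswlen]; exact hplen) hswp h0sw hbsw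
        exact ⟨by rw [l1, hswlen], l2, fun i hi => l3 i (by rw [hswlen]; exact hi)⟩
    · -- v ≤ heap[p] ≤ m, loop exits immediately
      rw [if_neg hgt]
      have hvm : v ≤ m := by
        rw [← hcv]
        exact le_trans (not_lt.mp hgt) (hb p (lt_trans hplt hlt) hpne)
      have hmax : max m v = m := by omega
      refine ⟨rfl, by rw [hmax, h0], ?_⟩
      intro i hilen
      rw [hmax]
      by_cases hic : i = current
      · subst hic; rw [hcv]; exact hvm
      · exact hb i hilen hic

theorem heapInsert_spec (heap : List Int) (m v : Int) (hne : heap ≠ [])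
    (hd : heap.getD 0 0 = m) (hb : ∀ i, i < heap.length → heap.getD i 0 ≤ m) :
    (heapInsert heap v).length = heap.length + 1 ∧
    (heapInsert heap v).getD 0 0 = max m v ∧
    (∀ i, i < (heapInsert heap v).length → (heapInsert heap v).getD i 0 ≤ max m v) := by
  unfold heapInsert
  have hlen0 : 0 < heap.length := List.length_pos_iff.mpr hne
  have hlen : (heap ++ [v]).length = heap.length + 1 := by simp
  have hcur : (heap ++ [v]).length - 1 = heap.length := by omega
  rw [hcur]
  have hgv : (heap ++ [v]).getD heap.length 0 = v := by
    have h1 : (heap ++ [v])[heap.length]? = [v][heap.length - heap.length]? :=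
      List.getElem?_append_right (le_refl heap.length)
    simp only [List.getD, h1, Nat.sub_self]
    rfl
  have hg0 : (heap ++ [v]).getD 0 0 = m := by
    have h1 : (heap ++ [v])[0]? = heap[0]? := List.getElem?_append_left hlen0
    rw [← hd]; simp only [List.getD, h1]
  have hbb : ∀ i, i < (heap ++ [v]).length → i ≠ heap.length →
      (heap ++ [v]).getD i 0 ≤ m := by
    intro i hi hine
    rw [hlen] at hi
    have hi' : i < heap.length := by omega
    have h1 : (heap ++ [v])[i]? = heap[i]? := List.getElem?_append_left hi'
    rw [show (heap ++ [v]).getD i 0 = heap.getD i 0 by simp only [List.getD, h1]]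
    exact hb i hi'
  obtain ⟨l1, l2, l3⟩ := siftUp_spec heap.length (heap ++ [v]) m v hlen0
    (by omega) hgv hg0 hbb
  exact ⟨by rw [l1, hlen], l2, fun i hi => l3 i (by rw [← l1]; exact hi)⟩

theorem heapInsert_nil (v : Int) : heapInsert [] v = [v] := by
  simp [heapInsert, siftUp]

-- both folds started from matching states with a non-empty holder produce the same holder
theorem loop_agree (xs : List Int) : ∀ (out : List Int) (heap : List Int) (m : Int),
    out ≠ [] → heap ≠ [] → heap.getD 0 0 = m →
    (∀ i, i < heap.length → heap.getD i 0 ≤ m) →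
    (xs.foldl streamStep (out, heap)).1 = (xs.foldl altStep (out, some m)).1 := by
  induction xs with
  | nil => intro out heap m _ _ _ _; rfl
  | cons x xs ih =>
    intro out heap m hout hne hd hb
    have houtE : out.isEmpty = false := by
      cases out with
      | nil => exact absurd rfl hout
      | cons a l => rfl
    obtain ⟨l1, l2, l3⟩ := heapInsert_spec heap m x hne hd hb
    have hstepA : streamStep (out, heap) x =
        (out ++ [(heapInsert heap x).getD 0 0], heapInsert heap x) := by
      simp [streamStep, houtE]
    have hstepB : altStep (out, some m) x = (out ++ [max m x], some (max m x)) := by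
      have hc : (if x > m then x else m) = max m x := by split <;> omega
      simp only [altStep]
      rw [hc]
    rw [List.foldl_cons, List.foldl_cons, hstepA, hstepB, ← l2]
    exact ih (out ++ [(heapInsert heap x).getD 0 0]) (heapInsert heap x)
      ((heapInsert heap x).getD 0 0) (by simp) (by rw [← List.length_pos_iff]; omega)
      rfl (by intro i hi; rw [l2]; exact l3 i hi)

-- ===== VERDICT (by name: the statement is the Claim_ definition above) =====
theorem stream_max_spec : Claim_equal_stream_max := by
  unfold Claim_equal_stream_max
  intro input_array _
  unfold Spec_stream_max stream_max stream_max_alt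
  cases input_array with
  | nil => rfl
  | cons x xs =>
    have hA : streamStep ([], []) x = ([x], [x]) := by
      simp [streamStep, heapInsert_nil]
    have hB : altStep ([], none) x = ([x], some x) := by
      simp [altStep]
    rw [List.foldl_cons, List.foldl_cons, hA, hB]
    exact loop_agree xs [x] [x] x (by simp) (by simp) rfl
      (by intro i hi
          have : i = 0 := by simp at hi; omega
          subst this; simp [List.getD])
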